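-- pv_equiv track=rewrite | github.com/revanwirawan36-oss/CodeProblemSubmissions | hr/SherlockAndDivisors.py | sherlock_and_divisors
-- ===== SOURCE A (Python) =====
-- import math
--
-- def sherlock_and_divisors(N):
--     hasil=0
--     if N % 2 !=0:
--         return hasil
--
--     for i in range(1, int(math.sqrt(N))+1):
--         if N % i == 0:
--             if i % 2 ==0:
--                 hasil+=1
--             if N // i % 2 == 0 and N // i != i:
--                 hasil+=1
--
--     return hasil
-- ===== SOURCE B (Python) =====
-- import math
--
-- def sherlock_and_divisors(N):
--     # Even divisors of N are exactly 2*e for divisors e of N//2,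
--     # so count divisors of N//2 by sqrt trial division.
--     if N % 2:
--         return 0
--     h = N // 2
--     d = 0
--     for i in range(1, int(math.sqrt(h)) + 1):
--         if h % i == 0:
--             d += 1
--             if h // i != i:
--                 d += 1
--     return d
-- ===== Notes on version B (the rewrite author's own statement) =====
-- stated objective: alternative
-- what changed: Instead of scanning i = 1..sqrt(N) and classifying both members of each divisor pair of N by parity, B uses the identity that the even divisors of N are exactly the doubles of the divisors of N//2, and counts divisors of N//2 with a plain sqrt(N//2)-bounded pair count.
import Mathlib
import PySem

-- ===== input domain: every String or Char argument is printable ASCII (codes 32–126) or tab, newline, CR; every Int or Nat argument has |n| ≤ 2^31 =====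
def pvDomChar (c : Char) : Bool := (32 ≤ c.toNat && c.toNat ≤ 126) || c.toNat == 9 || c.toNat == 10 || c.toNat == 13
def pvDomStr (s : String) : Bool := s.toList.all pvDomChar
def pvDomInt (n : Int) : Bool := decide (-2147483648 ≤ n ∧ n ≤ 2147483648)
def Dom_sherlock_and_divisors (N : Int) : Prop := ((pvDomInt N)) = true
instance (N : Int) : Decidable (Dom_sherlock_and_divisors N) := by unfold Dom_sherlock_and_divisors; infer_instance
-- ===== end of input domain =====

-- B counts divisors of N//2 (even divisors of N are exactly the doubles of divisors of N//2),
-- scanning only up to sqrt(N//2) instead of sqrt(N) with a plain divisor-pair count: alternative algorithm.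

-- ===== PORT A =====
-- int(math.sqrt(x)) is ported as Nat.sqrt x.toNat: exact for 0 ≤ x ≤ 2^31 (math.sqrt is a
-- correctly rounded double, so its floor is the integer square root in that range).
def sherlock_and_divisors (N : Int) : Int :=
  let hasil : Int := 0
  if PySem.Int.mod N 2 ≠ 0 then hasil
  else
    (PySem.List.pyRange 1 ((Nat.sqrt N.toNat : Int) + 1) 1).foldl
      (fun hasil i =>
        if PySem.Int.mod N i = 0 then
          let hasil := if PySem.Int.mod i 2 = 0 then hasil + 1 else hasil
          if PySem.Int.mod (PySem.Int.floordiv N i) 2 = 0 ∧ PySem.Int.floordiv N i ≠ i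
          then hasil + 1 else hasil
        else hasil) hasil

-- ===== PORT B =====
def sherlock_and_divisors_alt (N : Int) : Int :=
  if PySem.Int.mod N 2 ≠ 0 then 0
  else
    let h := PySem.Int.floordiv N 2
    (PySem.List.pyRange 1 ((Nat.sqrt h.toNat : Int) + 1) 1).foldl
      (fun d i =>
        if PySem.Int.mod h i = 0 then
          let d := d + 1
          if PySem.Int.floordiv h i ≠ i then d + 1 else d
        else d) 0

-- ===== PRECONDITION & SPEC =====
-- Pre_ excludes exactly the negative even N, on which Python A raises ValueError (math.sqrt of a
-- negative number); B raises there too.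
def Pre_sherlock_and_divisors (N : Int) : Prop := 0 ≤ N ∨ PySem.Int.mod N 2 ≠ 0
instance (N : Int) : Decidable (Pre_sherlock_and_divisors N) := by unfold Pre_sherlock_and_divisors; infer_instance
def pvWitness_sherlock_and_divisors : Int := 12

def Spec_sherlock_and_divisors (N : Int) (out : Int) : Prop := out = sherlock_and_divisors_alt N
instance (N : Int) (out : Int) : Decidable (Spec_sherlock_and_divisors N out) := by unfold Spec_sherlock_and_divisors; infer_instance

-- ===== CLAIM (what is proved, stated in full; the proofs are below) =====
def Claim_equal_sherlock_and_divisors : Prop := ∀ (N : Int), Dom_sherlock_and_divisors N → Pre_sherlock_and_divisors N → Spec_sherlock_and_divisors N (sherlock_and_divisors N)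

-- ===== LEMMAS AND PROOFS =====

-- a divisor ≤ √n whose codivisor differs from it has codivisor > √n
theorem pv_div_gt_sqrt {n j : ℕ} (hn : 0 < n) (hj : j ∣ n) (hjs : j ≤ Nat.sqrt n)
    (hne : n / j ≠ j) : Nat.sqrt n < n / j := by
  by_contra hle0
  have hle : n / j ≤ Nat.sqrt n := by omega
  have hj0 : 0 < j := Nat.pos_of_dvd_of_pos hj hn
  have hmul : j * (n / j) = n := Nat.mul_div_cancel' hj
  have hq0 : 0 < n / j := Nat.div_pos (Nat.le_of_dvd hn hj) hj0
  have h2 : Nat.sqrt n * Nat.sqrt n ≤ n := by nlinarith [Nat.sqrt_le' n]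
  have hjeq : j = Nat.sqrt n := by nlinarith
  have : n / j = Nat.sqrt n := by nlinarith
  exact hne (by omega)

-- a divisor > √n has codivisor ≤ √n
theorem pv_div_le_sqrt {n j : ℕ} (_hn : 0 < n) (hj : j ∣ n) (hjs : Nat.sqrt n < j) :
    n / j ≤ Nat.sqrt n := by
  by_contra hlt0
  have hlt : Nat.sqrt n < n / j := by omega
  have hmul : j * (n / j) = n := Nat.mul_div_cancel' hj
  nlinarith [Nat.lt_succ_sqrt' n]

-- the √-bounded pair count of divisors satisfying P equals the number of divisors satisfying P
theorem pv_pair_count (n : ℕ) (hn : 0 < n) (P : ℕ → Prop) [DecidablePred P] :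
    (∑ j ∈ Finset.Icc 1 (Nat.sqrt n),
      ((if j ∣ n ∧ P j then 1 else 0) + (if j ∣ n ∧ P (n / j) ∧ n / j ≠ j then 1 else 0) : ℕ))
    = (n.divisors.filter P).card := by
  rw [Finset.sum_add_distrib, ← Finset.card_filter, ← Finset.card_filter]
  have hlow : (Finset.Icc 1 (Nat.sqrt n)).filter (fun j => j ∣ n ∧ P j)
      = (n.divisors.filter P).filter (fun d => d ≤ Nat.sqrt n) := by
    ext j
    simp only [Finset.mem_filter, Finset.mem_Icc, Nat.mem_divisors]
    constructor
    · rintro ⟨⟨h1, h2⟩, h3, h4⟩; exact ⟨⟨⟨h3, by omega⟩, h4⟩, h2⟩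
    · rintro ⟨⟨⟨h3, _⟩, h4⟩, h2⟩
      exact ⟨⟨Nat.pos_of_dvd_of_pos h3 hn, h2⟩, h3, h4⟩
  have hhigh : ((Finset.Icc 1 (Nat.sqrt n)).filter
        (fun j => j ∣ n ∧ P (n / j) ∧ n / j ≠ j)).card
      = ((n.divisors.filter P).filter (fun d => ¬ d ≤ Nat.sqrt n)).card := by
    apply Finset.card_bij' (fun j _ => n / j) (fun d _ => n / d)
    · intro j hj
      simp only [Finset.mem_filter, Finset.mem_Icc, Nat.mem_divisors] at hj ⊢
      obtain ⟨⟨_, h2⟩, h3, h4, h5⟩ := hj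
      exact ⟨⟨⟨Nat.div_dvd_of_dvd h3, by omega⟩, h4⟩, by
        have := pv_div_gt_sqrt hn h3 h2 h5; omega⟩
    · intro d hd
      simp only [Finset.mem_filter, Finset.mem_Icc, Nat.mem_divisors] at hd ⊢
      obtain ⟨⟨⟨h1, _⟩, h2⟩, h3x⟩ := hd
      have h3 : Nat.sqrt n < d := by omega
      have hdd : n / (n / d) = d := Nat.div_div_self h1 (by omega)
      have hq : 0 < n / d := Nat.div_pos (Nat.le_of_dvd hn h1) (Nat.pos_of_dvd_of_pos h1 hn)
      refine ⟨⟨by omega, pv_div_le_sqrt hn h1 h3⟩, Nat.div_dvd_of_dvd h1, by rw [hdd]; exact h2, ?_⟩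
      rw [hdd]
      intro hcon
      have := pv_div_le_sqrt hn h1 h3; omega
    · intro j hj
      simp only [Finset.mem_filter, Finset.mem_Icc] at hj
      exact Nat.div_div_self hj.2.1 (by omega)
    · intro d hd
      simp only [Finset.mem_filter, Nat.mem_divisors] at hd
      exact Nat.div_div_self hd.1.1.1 (by omega)
  rw [hlow, hhigh, Finset.card_filter_add_card_filter_not (fun d => d ≤ Nat.sqrt n)]

-- even divisors of an even n are the doubles of the divisors of n/2
theorem pv_even_card (n : ℕ) (hn : 0 < n) (h2 : 2 ∣ n) :
    (n.divisors.filter (fun d => 2 ∣ d)).card = (n / 2).divisors.card := by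
  apply Finset.card_bij' (fun d _ => d / 2) (fun e _ => 2 * e)
  · intro d hd
    simp only [Finset.mem_filter, Nat.mem_divisors] at hd
    omega
  · intro e _
    omega
  · intro d hd
    simp only [Finset.mem_filter, Nat.mem_divisors] at hd ⊢
    obtain ⟨⟨hdvd, hne⟩, ⟨e, rfl⟩⟩ := hd
    obtain ⟨k, hk⟩ := hdvd
    have he2 : 2 * e / 2 = e := by omega
    have h1 : n / 2 = e * k := by
      rw [hk, mul_assoc, Nat.mul_div_cancel_left _ (by norm_num)]
    rw [he2]
    exact ⟨⟨k, h1⟩, by omega⟩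
  · intro e he
    simp only [Finset.mem_filter, Nat.mem_divisors] at he ⊢
    obtain ⟨⟨k, hk⟩, hne⟩ := he
    have hEq : n = 2 * (e * k) := by rw [← hk]; omega
    exact ⟨⟨⟨k, hEq.trans (mul_assoc 2 e k).symm⟩, by omega⟩, ⟨e, rfl⟩⟩

-- bridge: Python `x % j == 0` on casts of naturals is divisibility
theorem pv_mod_cast_dvd (n j : ℕ) : (PySem.Int.mod (n : Int) (j : Int) = 0) ↔ j ∣ n := by
  simp only [PySem.Int.mod_natCast, Nat.cast_eq_zero]
  omega
theorem pv_mod_two_dvd (a : Int) : (PySem.Int.mod a 2 = 0) ↔ (2 : Int) ∣ a :=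
  PySem.Int.mod_eq_zero_iff_dvd a 2

-- a sqrt-bounded counting foldl is the Icc sum of its per-index contribution
theorem pv_foldl_sqrt_sum (s : ℕ) (f : Int → ℤ → Int) (c : ℕ → ℕ)
    (hf : ∀ (acc : Int) (k : ℕ), f acc (1 + (k : Int)) = acc + (c (1 + k) : Int)) :
    (PySem.List.pyRange 1 ((s : Int) + 1) 1).foldl f 0
      = ((∑ j ∈ Finset.Icc 1 s, c j : ℕ) : Int) := by
  rw [PySem.List.pyRange_one]
  have hs : ((s : Int) + 1 - 1).toNat = s := by omega
  rw [hs, List.foldl_map]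
  have hfun : (fun (acc : Int) (k : ℕ) => f acc (1 + (k : Int)))
      = (fun (acc : Int) (k : ℕ) => acc + ((c (1 + k) : ℕ) : Int)) := by
    funext acc k; exact hf acc k
  rw [hfun, PySem.List.foldl_add]
  have hlist : ((List.range s).map (fun k => ((c (1 + k) : ℕ) : Int))).sum
      = ∑ k ∈ Finset.range s, ((c (1 + k) : ℕ) : Int) := rfl
  rw [zero_add, hlist, ← Nat.cast_sum]
  congr 1
  rw [← Finset.Ico_add_one_right_eq_Icc, Finset.sum_Ico_eq_sum_range]
  simp

-- per-index contribution of A's loop body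
def pv_cA (n j : ℕ) : ℕ :=
  if j ∣ n then (if 2 ∣ j then 1 else 0) + (if 2 ∣ (n / j) ∧ n / j ≠ j then 1 else 0) else 0

-- per-index contribution of B's loop body
def pv_cB (m j : ℕ) : ℕ :=
  if j ∣ m then (if m / j ≠ j then 2 else 1) else 0

theorem pv_sumA (n : ℕ) (hn : 0 < n) :
    ∑ j ∈ Finset.Icc 1 (Nat.sqrt n), pv_cA n j
      = (n.divisors.filter (fun d => 2 ∣ d)).card := by
  rw [← pv_pair_count n hn (fun d => 2 ∣ d)]
  apply Finset.sum_congr rfl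
  intro j _
  unfold pv_cA
  split_ifs <;> omega

theorem pv_sumB (m : ℕ) (hm : 0 < m) :
    ∑ j ∈ Finset.Icc 1 (Nat.sqrt m), pv_cB m j = m.divisors.card := by
  rw [← Finset.filter_true m.divisors, ← pv_pair_count m hm (fun _ => True)]
  apply Finset.sum_congr rfl
  intro j _
  unfold pv_cB
  split_ifs <;> first | omega | tauto

-- ===== VERDICT (by name: the statement is the Claim_ definition above) =====
theorem sherlock_and_divisors_spec : Claim_equal_sherlock_and_divisors := by
  intro N _ hpre
  unfold Spec_sherlock_and_divisors
  by_cases hodd : PySem.Int.mod N 2 = 0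
  · -- even branch of both programs
    have hN : 0 ≤ N := hpre.resolve_right (fun h => h hodd)
    obtain ⟨n, rfl⟩ : ∃ n : ℕ, N = (n : Int) := ⟨N.toNat, by omega⟩
    simp only [sherlock_and_divisors, sherlock_and_divisors_alt]
    rw [if_neg (not_not_intro hodd), if_neg (not_not_intro hodd)]
    rcases Nat.eq_zero_or_pos n with rfl | hpos
    · decide
    · have h2n : 2 ∣ n := by
        rw [pv_mod_two_dvd] at hodd; omega
      have hh : PySem.Int.floordiv ((n : ℕ) : Int) 2 = ((n / 2 : ℕ) : Int) := by
        exact_mod_cast PySem.Int.floordiv_natCast n 2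
      rw [hh]
      simp only [Int.toNat_natCast]
      refine Eq.trans (pv_foldl_sqrt_sum (Nat.sqrt n) _ (pv_cA n) ?_)
        (Eq.trans ?_ (pv_foldl_sqrt_sum (Nat.sqrt (n / 2)) _ (pv_cB (n / 2)) ?_).symm)
      · -- A's body adds pv_cA
        intro acc k
        have hcast : (1 : Int) + (k : Int) = ((1 + k : ℕ) : Int) := by push_cast; ring
        rw [hcast]
        have hfd : PySem.Int.floordiv ((n : ℕ) : Int) ((1 + k : ℕ) : Int)
            = ((n / (1 + k) : ℕ) : Int) := by
          exact_mod_cast PySem.Int.floordiv_natCast n (1 + k)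
        rw [hfd]
        have hd1 : (PySem.Int.mod ((1 + k : ℕ) : Int) 2 = 0) ↔ 2 ∣ (1 + k) := by
          rw [pv_mod_two_dvd]; omega
        have hd2 : (PySem.Int.mod ((n / (1 + k) : ℕ) : Int) 2 = 0) ↔ 2 ∣ (n / (1 + k)) := by
          rw [pv_mod_two_dvd]; omega
        have hd3 := pv_mod_cast_dvd n (1 + k)
        have hd4 : (((n / (1 + k) : ℕ) : Int) = ((1 + k : ℕ) : Int)) ↔ n / (1 + k) = 1 + k :=
          Nat.cast_inj
        unfold pv_cA
        simp only [hd1, hd2, hd3, ne_eq, hd4]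
        split_ifs <;> push_cast <;> ring
      · -- the two counts agree
        have := pv_even_card n hpos h2n
        rw [pv_sumA n hpos, pv_sumB (n / 2) (by omega), this]
      · -- B's body adds pv_cB
        intro acc k
        have hcast : (1 : Int) + (k : Int) = ((1 + k : ℕ) : Int) := by push_cast; ring
        rw [hcast]
        have hfd : PySem.Int.floordiv ((n / 2 : ℕ) : Int) ((1 + k : ℕ) : Int)
            = ((n / 2 / (1 + k) : ℕ) : Int) := by
          exact_mod_cast PySem.Int.floordiv_natCast (n / 2) (1 + k)
        rw [hfd]
        have hd3 := pv_mod_cast_dvd (n / 2) (1 + k)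
        have hd4 : (((n / 2 / (1 + k) : ℕ) : Int) = ((1 + k : ℕ) : Int)) ↔ n / 2 / (1 + k) = 1 + k :=
          Nat.cast_inj
        unfold pv_cB
        simp only [hd3, ne_eq, hd4]
        split_ifs <;> push_cast <;> ring
  · -- odd: both return 0 immediately
    simp only [sherlock_and_divisors, sherlock_and_divisors_alt]
    rw [if_pos hodd, if_pos hodd]
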